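-- pv_equiv track=rewrite | github.com/xycforgithub/BiMPM | data-script/restore.py | SearchPos
-- ===== SOURCE A (Python) =====
-- def SearchPos(span_list, start, stop):
--     spans = []
--     cnt = 0
--     for sent in span_list:
--         for token in sent:
--             if start == cnt:
--                 spans.append(token)
--             if stop == cnt:
--                 spans.append(token)
--             cnt += 1
--     #print len(spans),start,stop;
--     #print spans, start, stop, cnt
--     assert len(spans) == 2
--
--     return (spans[0][0], spans[1][1])
-- ===== SOURCE B (Python) =====
-- def SearchPos(span_list, start, stop):
--     def locate(idx):
--         rem = idx
--         for sent in span_list: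
--             if rem < len(sent):
--                 return sent[rem]
--             rem -= len(sent)
--         assert False
--
--     total = sum(len(sent) for sent in span_list)
--     assert 0 <= start < total and 0 <= stop < total
--     return (locate(min(start, stop))[0], locate(max(start, stop))[1])
-- ===== Notes on version B (the rewrite author's own statement) =====
-- stated objective: alternative
-- what changed: B never flattens or scans tokens: it checks bounds against the summed sentence lengths and locates each of the two indices by skipping whole sentences (subtracting sentence lengths from the remaining index) and indexing once into the containing sentence, instead of A's counter-driven per-token scan that appends matching tokens.
import Mathlib
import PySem

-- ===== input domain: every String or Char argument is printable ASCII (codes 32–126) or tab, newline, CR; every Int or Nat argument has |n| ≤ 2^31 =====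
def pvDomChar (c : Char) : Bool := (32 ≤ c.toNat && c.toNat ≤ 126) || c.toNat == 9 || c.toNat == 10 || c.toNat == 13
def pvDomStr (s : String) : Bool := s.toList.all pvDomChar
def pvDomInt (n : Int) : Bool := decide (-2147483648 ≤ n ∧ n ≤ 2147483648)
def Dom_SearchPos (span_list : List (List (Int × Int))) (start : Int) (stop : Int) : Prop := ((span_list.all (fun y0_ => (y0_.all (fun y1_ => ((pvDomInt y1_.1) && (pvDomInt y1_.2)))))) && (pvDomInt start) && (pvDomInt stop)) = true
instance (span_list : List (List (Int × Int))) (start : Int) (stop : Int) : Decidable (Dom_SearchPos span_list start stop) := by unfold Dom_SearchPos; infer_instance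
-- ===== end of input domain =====

-- B never flattens: it locates each index by skipping whole sentences (subtracting sentence
-- lengths from the remaining index) and indexing once into the containing sentence, instead of
-- A's counter-driven per-token scan; return values agree on all of Pre_.

-- ===== PORT A =====
-- the body of A's inner loop: two conditional appends, then cnt += 1
def pvStep (start : Int) (stop : Int) (acc : List (Int × Int) × Int) (token : Int × Int) :
    List (Int × Int) × Int :=
  let spans := acc.1
  let cnt := acc.2
  let spans := if start = cnt then spans ++ [token] else spans
  let spans := if stop = cnt then spans ++ [token] else spans
  (spans, cnt + 1)

def SearchPos (span_list : List (List (Int × Int))) (start : Int) (stop : Int) : Int × Int :=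
  let r := span_list.foldl (fun acc sent => sent.foldl (pvStep start stop) acc) ([], 0)
  -- 'assert len(spans) == 2' raises outside Pre_; under Pre_ both lookups are in range
  ((PySem.List.pyGetD r.1 0 (0, 0)).1, (PySem.List.pyGetD r.1 1 (0, 0)).2)

-- ===== PORT B =====
-- B's helper 'locate': walk the sentences, subtracting each sentence's length from the
-- remaining index until it falls inside the current sentence; 'assert False' is unreachable
-- under Pre_ (the default (0,0) stands for that unreachable fall-through).
def pvLocate (span_list : List (List (Int × Int))) (rem : Int) : Int × Int :=
  match span_list with
  | [] => (0, 0)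
  | sent :: rest =>
      if rem < (sent.length : Int) then PySem.List.pyGetD sent rem (0, 0)
      else pvLocate rest (rem - sent.length)

def SearchPos_alt (span_list : List (List (Int × Int))) (start : Int) (stop : Int) : Int × Int :=
  let total := span_list.foldl (fun a sent => a + (sent.length : Int)) 0
  -- 'assert 0 <= start < total and 0 <= stop < total' raises outside Pre_
  let _ := total
  ((pvLocate span_list (min start stop)).1, (pvLocate span_list (max start stop)).2)

-- ===== PRECONDITION & SPEC =====
-- Pre_ = exactly the inputs on which A's 'assert len(spans) == 2' passes (and B's bounds
-- assert too): both flattened indices are in range of the total token count.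
def Pre_SearchPos (span_list : List (List (Int × Int))) (start : Int) (stop : Int) : Prop :=
  0 ≤ start ∧ start < (span_list.flatMap (fun sent => sent)).length ∧
  0 ≤ stop ∧ stop < (span_list.flatMap (fun sent => sent)).length

instance (span_list : List (List (Int × Int))) (start : Int) (stop : Int) :
    Decidable (Pre_SearchPos span_list start stop) := by unfold Pre_SearchPos; infer_instance

def pvWitness_SearchPos : (List (List (Int × Int))) × Int × Int := ([[(1, 2)], [(3, 4), (5, 6)]], 0, 2)

def Spec_SearchPos (span_list : List (List (Int × Int))) (start : Int) (stop : Int) (out : Int × Int) : Prop := out = SearchPos_alt span_list start stop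
instance (span_list : List (List (Int × Int))) (start : Int) (stop : Int) (out : Int × Int) : Decidable (Spec_SearchPos span_list start stop out) := by unfold Spec_SearchPos; infer_instance

-- ===== CLAIM (what is proved, stated in full; the proofs are below) =====
def Claim_equal_SearchPos : Prop := ∀ (span_list : List (List (Int × Int))) (start : Int) (stop : Int), Dom_SearchPos span_list start stop → Pre_SearchPos span_list start stop → Spec_SearchPos span_list start stop (SearchPos span_list start stop)

-- ===== LEMMAS AND PROOFS =====

-- the tokens A's scan appends while the counter runs from c over l
def pvCollect (start : Int) (stop : Int) : List (Int × Int) → Int → List (Int × Int)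
  | [], _ => []
  | t :: ts, c =>
      ((if start = c then [t] else []) ++ (if stop = c then [t] else [])) ++
        pvCollect start stop ts (c + 1)

lemma pvStep_eq (start stop : Int) (s : List (Int × Int)) (c : Int) (t : Int × Int) :
    pvStep start stop (s, c) t =
      (s ++ ((if start = c then [t] else []) ++ (if stop = c then [t] else [])), c + 1) := by
  simp only [pvStep]
  split_ifs <;> simp

lemma foldl_pvStep (start stop : Int) :
    ∀ (l : List (Int × Int)) (s : List (Int × Int)) (c : Int),
      l.foldl (pvStep start stop) (s, c) = (s ++ pvCollect start stop l c, c + l.length) := by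
  intro l
  induction l with
  | nil => intro s c; simp [pvCollect]
  | cons t ts ih =>
      intro s c
      simp only [List.foldl_cons, pvStep_eq, ih, pvCollect, List.append_assoc,
        List.length_cons, Prod.mk.injEq, true_and]
      omega

lemma pyGet?_cons_of_pos {α : Type} (t : α) (xs : List α) (k : Int) (h : 1 ≤ k) :
    PySem.List.pyGet? (t :: xs) k = PySem.List.pyGet? xs (k - 1) := by
  rw [PySem.List.pyGet?_of_nonneg (t :: xs) (by omega), PySem.List.pyGet?_of_nonneg xs (by omega)]
  have hk : k.toNat = (k - 1).toNat + 1 := by omega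
  rw [hk, List.getElem?_cons_succ]

lemma pvCollect_nil (start stop : Int) :
    ∀ (l : List (Int × Int)) (c : Int), start < c → stop < c → pvCollect start stop l c = [] := by
  intro l
  induction l with
  | nil => intro c _ _; rfl
  | cons t ts ih =>
      intro c h1 h2
      simp only [pvCollect, if_neg (by omega : ¬ start = c), if_neg (by omega : ¬ stop = c)]
      simpa using ih (c + 1) (by omega) (by omega)

-- only the 'stop' index is still ahead of the counter
lemma pvCollect_one_stop (start stop : Int) :
    ∀ (l : List (Int × Int)) (c : Int), start < c → c ≤ stop →
      pvCollect start stop l c = (PySem.List.pyGet? l (stop - c)).toList := by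
  intro l
  induction l with
  | nil => intro c _ _; simp [pvCollect, PySem.List.pyGet?, PySem.List.pyIdx?]
  | cons t ts ih =>
      intro c h1 h2
      simp only [pvCollect, if_neg (by omega : ¬ start = c)]
      by_cases hs : stop = c
      · rw [if_pos hs, pvCollect_nil start stop ts (c + 1) (by omega) (by omega),
          show stop - c = 0 by omega, PySem.List.pyGet?_zero_cons]
        simp
      · rw [if_neg hs, pyGet?_cons_of_pos t ts (stop - c) (by omega),
          show stop - c - 1 = stop - (c + 1) by ring]
        simpa using ih (c + 1) (by omega) (by omega)

-- only the 'start' index is still ahead of the counter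
lemma pvCollect_one_start (start stop : Int) :
    ∀ (l : List (Int × Int)) (c : Int), stop < c → c ≤ start →
      pvCollect start stop l c = (PySem.List.pyGet? l (start - c)).toList := by
  intro l
  induction l with
  | nil => intro c _ _; simp [pvCollect, PySem.List.pyGet?, PySem.List.pyIdx?]
  | cons t ts ih =>
      intro c h1 h2
      simp only [pvCollect, if_neg (by omega : ¬ stop = c)]
      by_cases hs : start = c
      · rw [if_pos hs, pvCollect_nil start stop ts (c + 1) (by omega) (by omega),
          show start - c = 0 by omega, PySem.List.pyGet?_zero_cons]
        simp
      · rw [if_neg hs, pyGet?_cons_of_pos t ts (start - c) (by omega),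
          show start - c - 1 = start - (c + 1) by ring]
        simpa using ih (c + 1) (by omega) (by omega)

-- A's appended tokens, in order: the token at the smaller index first, then the larger
lemma pvCollect_spec (start stop : Int) :
    ∀ (l : List (Int × Int)) (c : Int), c ≤ start → c ≤ stop →
      pvCollect start stop l c =
        (PySem.List.pyGet? l (min start stop - c)).toList ++
          (PySem.List.pyGet? l (max start stop - c)).toList := by
  intro l
  induction l with
  | nil => intro c _ _; simp [pvCollect, PySem.List.pyGet?, PySem.List.pyIdx?]
  | cons t ts ih =>
      intro c h1 h2
      by_cases hst : start = c
      · by_cases hsp : stop = c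
        · simp only [pvCollect, if_pos hst, if_pos hsp]
          rw [pvCollect_nil start stop ts (c + 1) (by omega) (by omega),
            show min start stop - c = 0 by omega, show max start stop - c = 0 by omega,
            PySem.List.pyGet?_zero_cons]
          simp
        · simp only [pvCollect, if_pos hst, if_neg hsp]
          rw [pvCollect_one_stop start stop ts (c + 1) (by omega) (by omega),
            show min start stop - c = 0 by omega, PySem.List.pyGet?_zero_cons,
            pyGet?_cons_of_pos t ts (max start stop - c) (by omega),
            show max start stop - c - 1 = stop - (c + 1) by omega]
          simp
      · by_cases hsp : stop = c
        · simp only [pvCollect, if_neg hst, if_pos hsp]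
          rw [pvCollect_one_start start stop ts (c + 1) (by omega) (by omega),
            show min start stop - c = 0 by omega, PySem.List.pyGet?_zero_cons,
            pyGet?_cons_of_pos t ts (max start stop - c) (by omega),
            show max start stop - c - 1 = start - (c + 1) by omega]
          simp
        · simp only [pvCollect, if_neg hst, if_neg hsp, List.nil_append]
          rw [ih (c + 1) (by omega) (by omega),
            pyGet?_cons_of_pos t ts (min start stop - c) (by omega),
            pyGet?_cons_of_pos t ts (max start stop - c) (by omega),
            show min start stop - c - 1 = min start stop - (c + 1) by ring,
            show max start stop - c - 1 = max start stop - (c + 1) by ring]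

-- B's sentence-skipping walk agrees with indexing into the flattened list
lemma pvLocate_eq :
    ∀ (sl : List (List (Int × Int))) (i : Int), 0 ≤ i →
      i < ((sl.flatMap (fun sent => sent)).length : Int) →
      pvLocate sl i = PySem.List.pyGetD (sl.flatMap (fun sent => sent)) i (0, 0) := by
  intro sl
  induction sl with
  | nil => intro i h0 h1; simp at h1; omega
  | cons sent rest ih =>
      intro i h0 h1
      simp only [List.flatMap_cons] at h1 ⊢
      by_cases hlt : i < (sent.length : Int)
      · rw [pvLocate, if_pos hlt,
          PySem.List.pyGetD_eq_getElem sent (0, 0) h0 hlt,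
          PySem.List.pyGetD_eq_getElem (sent ++ rest.flatMap (fun s => s)) (0, 0) h0 (by
            rw [List.length_append]; push_cast; omega)]
        exact (List.getElem_append_left (by omega)).symm
      · rw [pvLocate, if_neg hlt]
        rw [List.length_append] at h1
        push_cast at h1
        have hrest : i - sent.length < ((rest.flatMap (fun s => s)).length : Int) := by omega
        rw [ih (i - sent.length) (by omega) hrest,
          PySem.List.pyGetD_eq_getElem (rest.flatMap (fun s => s)) (0, 0) (by omega) hrest,
          PySem.List.pyGetD_eq_getElem (sent ++ rest.flatMap (fun s => s)) (0, 0) h0 (by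
            rw [List.length_append]; push_cast; omega)]
        rw [List.getElem_append_right (by omega)]
        congr 1
        omega

-- ===== VERDICT (by name: the statement is the Claim_ definition above) =====
theorem SearchPos_spec : Claim_equal_SearchPos := by
  intro span_list start stop _ hpre
  obtain ⟨h1, h2, h3, h4⟩ := hpre
  unfold Spec_SearchPos
  simp only [SearchPos, SearchPos_alt]
  rw [← List.foldl_flatMap, foldl_pvStep start stop (span_list.flatMap (fun sent => sent)) [] 0,
    pvCollect_spec start stop (span_list.flatMap (fun sent => sent)) 0 (by omega) (by omega)]
  simp only [sub_zero, List.nil_append]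
  set flat := span_list.flatMap (fun sent => sent) with hflat
  have hlo0 : (0:Int) ≤ min start stop := by omega
  have hlo1 : min start stop < (flat.length : Int) := by omega
  have hhi0 : (0:Int) ≤ max start stop := by omega
  have hhi1 : max start stop < (flat.length : Int) := by omega
  rw [PySem.List.pyGet?_eq_some_getElem flat hlo0 hlo1,
    PySem.List.pyGet?_eq_some_getElem flat hhi0 hhi1,
    pvLocate_eq span_list (min start stop) hlo0 (by rw [← hflat]; exact hlo1),
    pvLocate_eq span_list (max start stop) hhi0 (by rw [← hflat]; exact hhi1),
    ← hflat,
    PySem.List.pyGetD_eq_getElem flat (0, 0) hlo0 hlo1,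
    PySem.List.pyGetD_eq_getElem flat (0, 0) hhi0 hhi1]
  simp only [Option.toList_some, List.cons_append, List.nil_append,
    PySem.List.pyGetD_zero_cons]
  rw [show (1:Int) = ((1:Nat):Int) from rfl, PySem.List.pyGetD_natCast]
  simp
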